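-- pv_equiv track=rewrite | github.com/Jason003/interview | Bloomberg/Candy Crush.py | candyCrush1D
-- ===== SOURCE A (Python) =====
-- def candyCrush1D(candies):
--     stack = []
--     for c in candies:
--         if len(stack) >= 2 and stack[-1] == stack[-2] == c:
--             stack.pop()
--             stack.pop()
--         else:
--             stack.append(c)
--     return stack
-- ===== SOURCE B (Python) =====
-- def candyCrush1D(candies):
--     # Run-length stack of [value, count] pairs instead of a per-candy stack.
--     runs = []
--     for c in candies:
--         if runs and runs[-1][0] == c:
--             runs[-1][1] += 1
--             if runs[-1][1] == 3:
--                 runs.pop()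
--         else:
--             runs.append([c, 1])
--     out = []
--     for v, k in runs:
--         out.extend([v] * k)
--     return out
-- ===== Notes on version B (the rewrite author's own statement) =====
-- stated objective: alternative
-- what changed: Replaces the per-candy stack (push each candy, pop two on a matching triple) with a run-length stack of (value,count) pairs that is flattened into the result at the end.
import Mathlib
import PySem

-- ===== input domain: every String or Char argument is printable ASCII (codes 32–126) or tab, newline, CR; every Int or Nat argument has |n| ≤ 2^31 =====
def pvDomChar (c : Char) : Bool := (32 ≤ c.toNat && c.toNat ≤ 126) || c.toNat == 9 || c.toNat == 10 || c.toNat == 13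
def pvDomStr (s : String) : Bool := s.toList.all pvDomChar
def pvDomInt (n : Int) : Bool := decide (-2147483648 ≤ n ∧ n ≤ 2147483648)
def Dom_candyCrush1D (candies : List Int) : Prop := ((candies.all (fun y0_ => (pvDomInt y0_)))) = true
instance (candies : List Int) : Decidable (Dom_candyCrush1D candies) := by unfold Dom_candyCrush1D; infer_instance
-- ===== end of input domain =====

-- B replaces A's per-candy stack by a run-length stack of (value,count) pairs, flattened at the end; same cost, different data structure.

-- ===== PORT A =====
-- A's stack is kept reversed (head = list's top, Python's stack[-1]); reversed back on return.
def pvStepA (stack : List Int) (c : Int) : List Int :=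
  match stack with
  | a :: b :: rest => if a = b ∧ b = c then rest else c :: a :: b :: rest
  | _ => c :: stack

def candyCrush1D (candies : List Int) : List Int :=
  (candies.foldl pvStepA []).reverse

-- ===== PORT B =====
-- B's run stack kept reversed (head = top); counts are Nats (always ≥ 1 in Python too).
def pvStepB (runs : List (Int × Nat)) (c : Int) : List (Int × Nat) :=
  match runs with
  | (v, k) :: rest =>
      if v = c then (if k + 1 = 3 then rest else (v, k + 1) :: rest)
      else (c, 1) :: (v, k) :: rest
  | [] => [(c, 1)]

def candyCrush1D_alt (candies : List Int) : List Int :=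
  ((candies.foldl pvStepB []).reverse).flatMap (fun p => List.replicate p.2 p.1)

-- ===== PRECONDITION & SPEC =====
def Spec_candyCrush1D (candies : List Int) (out : List Int) : Prop := out = candyCrush1D_alt candies
instance (candies : List Int) (out : List Int) : Decidable (Spec_candyCrush1D candies out) := by unfold Spec_candyCrush1D; infer_instance

-- ===== CLAIM (what is proved, stated in full; the proofs are below) =====
def Claim_equal_candyCrush1D : Prop := ∀ (candies : List Int), Dom_candyCrush1D candies → Spec_candyCrush1D candies (candyCrush1D candies)

-- ===== LEMMAS AND PROOFS =====

/-- Flatten a (reversed) run-length stack into the corresponding plain stack. -/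
def pvFlat (runs : List (Int × Nat)) : List Int :=
  runs.flatMap (fun p => List.replicate p.2 p.1)

/-- Invariant of B's run stack: every count is 1 or 2 and adjacent runs have distinct values. -/
def pvWf : List (Int × Nat) → Prop
  | [] => True
  | (v, k) :: rest =>
      (k = 1 ∨ k = 2) ∧ (∀ w kw, rest.head? = some (w, kw) → w ≠ v) ∧ pvWf rest

lemma pvWf_cons (v : Int) (k : Nat) (rest : List (Int × Nat)) :
    pvWf ((v, k) :: rest) ↔
      (k = 1 ∨ k = 2) ∧ (∀ w kw, rest.head? = some (w, kw) → w ≠ v) ∧ pvWf rest :=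
  Iff.rfl

lemma pvStep_eq (runs : List (Int × Nat)) (c : Int) (h : pvWf runs) :
    pvStepA (pvFlat runs) c = pvFlat (pvStepB runs c) ∧ pvWf (pvStepB runs c) := by
  match runs with
  | [] => simp [pvStepA, pvStepB, pvFlat, pvWf]
  | (v, k) :: rest =>
    rw [pvWf_cons] at h
    obtain ⟨hk, hadj, hrest⟩ := h
    rcases hk with rfl | rfl
    · -- count 1 on top
      by_cases hvc : v = c
      · subst hvc
        refine ⟨?_, ?_⟩
        · match rest with
          | [] => simp [pvStepA, pvStepB, pvFlat]
          | (w, kw) :: rest' =>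
            have hw : w ≠ v := hadj w kw rfl
            rw [pvWf_cons] at hrest
            obtain ⟨hkw, _, _⟩ := hrest
            rcases hkw with rfl | rfl <;>
              simp [pvStepA, pvStepB, pvFlat, hw, List.replicate]
        · simp only [pvStepB, if_true]
          norm_num
          rw [pvWf_cons]
          exact ⟨Or.inr rfl, hadj, hrest⟩
      · refine ⟨?_, ?_⟩
        · match rest with
          | [] => simp [pvStepA, pvStepB, pvFlat, hvc, List.replicate]
          | (w, kw) :: rest' =>
            have hw : w ≠ v := hadj w kw rfl
            rw [pvWf_cons] at hrest
            obtain ⟨hkw, _, _⟩ := hrest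
            rcases hkw with rfl | rfl <;>
              simp [pvStepA, pvStepB, pvFlat, hvc, (Ne.symm hw : v ≠ w), List.replicate]
        · simp only [pvStepB, if_neg hvc]
          rw [pvWf_cons]
          refine ⟨Or.inl rfl, fun w kw hw => ?_, ?_⟩
          · simp at hw; rw [← hw.1]; exact hvc
          · rw [pvWf_cons]; exact ⟨Or.inl rfl, hadj, hrest⟩
    · -- count 2 on top
      by_cases hvc : v = c
      · subst hvc
        refine ⟨by simp [pvStepA, pvStepB, pvFlat, List.replicate], ?_⟩
        simp only [pvStepB, if_true]
        exact hrest
      · refine ⟨?_, ?_⟩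
        · simp [pvStepA, pvStepB, pvFlat, hvc, List.replicate]
        · simp only [pvStepB, if_neg hvc]
          rw [pvWf_cons]
          refine ⟨Or.inl rfl, fun w kw hw => ?_, ?_⟩
          · simp at hw; rw [← hw.1]; exact hvc
          · rw [pvWf_cons]; exact ⟨Or.inr rfl, hadj, hrest⟩

lemma pvLoop_eq (cs : List Int) (runs : List (Int × Nat)) (h : pvWf runs) :
    cs.foldl pvStepA (pvFlat runs) = pvFlat (cs.foldl pvStepB runs) ∧
      pvWf (cs.foldl pvStepB runs) := by
  induction cs generalizing runs with
  | nil => exact ⟨rfl, h⟩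
  | cons c cs ih =>
    obtain ⟨he, hw⟩ := pvStep_eq runs c h
    simpa [List.foldl, he] using ih (pvStepB runs c) hw

-- ===== VERDICT (by name: the statement is the Claim_ definition above) =====
theorem candyCrush1D_spec : Claim_equal_candyCrush1D := by
  intro candies _
  show candyCrush1D candies = candyCrush1D_alt candies
  have h := (pvLoop_eq candies [] trivial).1
  simp only [pvFlat, List.flatMap_nil] at h
  rw [candyCrush1D, candyCrush1D_alt, h, List.reverse_flatMap]
  congr 1
  funext p
  exact List.reverse_replicate
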